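-- pv_equiv track=rewrite | github.com/hula32/SW-expertacademy | SSAFY/실습문제/0915 그래프/9_Graph/연산.py | bfs
-- ===== SOURCE A (Python) =====
-- from collections import deque
--
-- def bfs(start, target):
--     if start == target:
--         return 0
--
--     MAX = 1000000
--
--     visited = [False] * (MAX + 1)
--     q = deque([(start, 0)])
--     visited[start] = True
--
--     while q:
--         v, dist = q.popleft()
--
--         for nxt in (v + 1, v - 1, v * 2, v - 10):
--             if nxt == target:
--                 return dist + 1
--
--             if 0 <= nxt <= MAX and not visited[nxt]:
--                 visited[nxt] = True
--                 q.append((nxt, dist + 1))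
--
--     return -1
-- ===== SOURCE B (Python) =====
-- def bfs(start, target):
--     if start == target:
--         return 0
--
--     MAX = 1000000
--
--     visited = [False] * (MAX + 1)
--     visited[start] = True
--
--     frontier = [start]
--     depth = 0
--     while frontier:
--         nxt_frontier = []
--         for v in frontier:
--             for nb in (v + 1, v - 1, v * 2, v - 10):
--                 if nb == target:
--                     return depth + 1
--                 if 0 <= nb <= MAX and not visited[nb]:
--                     visited[nb] = True
--                     nxt_frontier.append(nb)
--         frontier = nxt_frontier
--         depth += 1
--     return -1
-- ===== Notes on version B (the rewrite author's own statement) =====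
-- stated objective: alternative
-- what changed: Replaces the deque of (node, dist) pairs by a level-synchronous BFS: a frontier list plus one integer depth counter per level, so no distance is stored per node and no deque is needed.
import Mathlib
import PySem

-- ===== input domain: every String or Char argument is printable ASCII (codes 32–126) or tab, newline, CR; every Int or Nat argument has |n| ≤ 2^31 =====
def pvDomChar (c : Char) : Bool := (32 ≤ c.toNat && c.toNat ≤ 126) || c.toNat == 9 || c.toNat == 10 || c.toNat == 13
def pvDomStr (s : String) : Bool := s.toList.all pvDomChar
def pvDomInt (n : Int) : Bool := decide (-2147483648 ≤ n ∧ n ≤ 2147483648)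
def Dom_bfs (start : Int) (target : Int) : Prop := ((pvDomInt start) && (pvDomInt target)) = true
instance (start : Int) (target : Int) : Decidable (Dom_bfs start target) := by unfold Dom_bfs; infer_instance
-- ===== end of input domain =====

-- B re-implements A's BFS level-synchronously (frontier list + one depth counter instead of a
-- deque of (node, dist) pairs); equal return value on all inputs where A does not raise.
-- Both ports model Python's `visited` list of MAX+1 booleans by the set of indices holding True
-- (exact: a list of booleans is its characteristic set), and Python's negative-index write
-- `visited[start] = True` for -1000001 ≤ start ≤ -1 as marking index 1000001 + start.
-- Both loops carry a fuel counter, decremented once per processed node, purely as a totality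
-- guard: at most 1000002 nodes are ever enqueued (each enqueue marks a fresh index), and both
-- ports start with fuel 1000002, so the guard never fires on any input.

-- ===== PORT A =====
-- A's inner `for nxt in (v+1, v-1, v*2, v-10)`: target check first, then bounds+visited check,
-- marking and appending to the deque (modelled as an array with a read index).
def neighsA (t d : Int) : List Int → Std.HashSet Int → Array (Int × Int) →
    Option (Std.HashSet Int × Array (Int × Int))
  | [], vis, q => some (vis, q)
  | n :: ns, vis, q =>
    if n = t then none
    else if 0 ≤ n ∧ n ≤ 1000000 ∧ vis.contains n = false then
      neighsA t d ns (vis.insert n) (q.push (n, d + 1))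
    else
      neighsA t d ns vis q

-- A's `while q:` with `v, dist = q.popleft()`; the deque is the array `q` from index `i` on,
-- so `while q` is `q[i]? = some _`.
def loopA (t : Int) (fuel : Nat) (i : Nat) (q : Array (Int × Int)) (vis : Std.HashSet Int) : Int :=
  match q[i]? with
  | none => -1
  | some (v, d) =>
    match fuel with
    | 0 => -1  -- fuel guard, never reached from the top-level entry
    | fuel' + 1 =>
      match neighsA t d [v + 1, v - 1, v * 2, v - 10] vis q with
      | none => d + 1
      | some (vis', q') => loopA t fuel' (i + 1) q' vis'
termination_by fuel
decreasing_by omega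

def bfs (start : Int) (target : Int) : Int :=
  if start = target then 0
  else
    loopA target 1000002 0 (Array.mk [(start, 0)])
      ((∅ : Std.HashSet Int).insert (if start < 0 then 1000001 + start else start))

-- ===== PORT B =====
-- B's inner `for nb in (v+1, v-1, v*2, v-10)`: target check first, then bounds+visited check,
-- marking and appending to the next frontier (threaded as a front-consed list, reversed once
-- per level — the functional idiom for Python's `nxt_frontier.append`).
def neighsB (t : Int) : List Int → Std.HashSet Int → List Int →
    Option (Std.HashSet Int × List Int)
  | [], vis, acc => some (vis, acc)
  | n :: ns, vis, acc =>
    if n = t then none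
    else if 0 ≤ n ∧ n ≤ 1000000 ∧ vis.contains n = false then
      neighsB t ns (vis.insert n) (n :: acc)
    else
      neighsB t ns vis acc

-- B's `for v in frontier`; `.error r` = immediate return value r, `.ok (fuel', vis', nf)` =
-- level finished with remaining fuel, visited set and next frontier (acc reversed back).
def levelB (t d : Int) : Nat → List Int → Std.HashSet Int → List Int →
    Except Int (Nat × Std.HashSet Int × List Int)
  | fuel, [], vis, acc => .ok (fuel, vis, acc.reverse)
  | 0, _ :: _, _, _ => .error (-1)  -- fuel guard, never reached from the top-level entry
  | fuel + 1, v :: vs, vis, acc =>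
    match neighsB t [v + 1, v - 1, v * 2, v - 10] vis acc with
    | none => .error (d + 1)
    | some (vis', acc') => levelB t d fuel vs vis' acc'

-- fuel accounting for termination of the outer loop
theorem levelB_ok_fuel (t d : Int) : ∀ (fuel : Nat) (l : List Int) (vis : Std.HashSet Int)
    (acc : List Int) (f' : Nat) (vis' : Std.HashSet Int) (nf : List Int),
    levelB t d fuel l vis acc = .ok (f', vis', nf) → f' + l.length ≤ fuel := by
  intro fuel l
  induction l generalizing fuel with
  | nil =>
    intro vis acc f' vis' nf h
    simp only [levelB, Except.ok.injEq, Prod.mk.injEq] at h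
    obtain ⟨h1, -, -⟩ := h
    simp
    omega
  | cons v vs ih =>
    intro vis acc f' vis' nf h
    match fuel with
    | 0 => simp [levelB] at h
    | fuel + 1 =>
      simp only [levelB] at h
      cases hn : neighsB t [v + 1, v - 1, v * 2, v - 10] vis acc with
      | none => rw [hn] at h; simp at h
      | some p =>
        obtain ⟨pv, pn⟩ := p
        rw [hn] at h
        dsimp only at h
        have := ih fuel pv pn f' vis' nf h
        simp only [List.length_cons]
        omega

-- B's `while frontier:` with `depth += 1` per level.
def outerB (t : Int) (fuel : Nat) (frontier : List Int) (d : Int) (vis : Std.HashSet Int) : Int :=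
  match frontier with
  | [] => -1
  | v :: vs =>
    match h : levelB t d fuel (v :: vs) vis [] with
    | .error r => r
    | .ok (fuel', vis', nf) => outerB t fuel' nf (d + 1) vis'
termination_by fuel
decreasing_by
  have := levelB_ok_fuel t d fuel (v :: vs) vis [] fuel' vis' nf h
  simp at this; omega

def bfs_alt (start : Int) (target : Int) : Int :=
  if start = target then 0
  else
    outerB target 1000002 [start] 0
      ((∅ : Std.HashSet Int).insert (if start < 0 then 1000001 + start else start))

-- ===== PRECONDITION & SPEC =====
-- Pre_ excludes exactly the inputs where Python A raises IndexError: start outside the index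
-- range [-1000001, 1000000] of the visited list (unless start == target, which returns first).
def Pre_bfs (start : Int) (target : Int) : Prop :=
  start = target ∨ (-1000001 ≤ start ∧ start ≤ 1000000)
instance (start : Int) (target : Int) : Decidable (Pre_bfs start target) := by
  unfold Pre_bfs; infer_instance

def pvWitness_bfs : Int × Int := (0, 5)

def Spec_bfs (start : Int) (target : Int) (out : Int) : Prop := out = bfs_alt start target
instance (start : Int) (target : Int) (out : Int) : Decidable (Spec_bfs start target out) := by
  unfold Spec_bfs; infer_instance

-- ===== CLAIM (what is proved, stated in full; the proofs are below) =====
def Claim_equal_bfs : Prop := ∀ (start : Int) (target : Int), Dom_bfs start target →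
  Pre_bfs start target → Spec_bfs start target (bfs start target)

-- ===== LEMMAS AND PROOFS =====

theorem outerB_cons (t : Int) (fuel : Nat) (v : Int) (vs : List Int) (d : Int)
    (vis : Std.HashSet Int) :
    outerB t fuel (v :: vs) d vis =
      (match levelB t d fuel (v :: vs) vis [] with
       | .error r => r
       | .ok (fuel', vis', nf) => outerB t fuel' nf (d + 1) vis') := by
  rw [outerB]
  cases hl : levelB t d fuel (v :: vs) vis [] with
  | error r => rfl
  | ok q => obtain ⟨qf, qv, qn⟩ := q; rfl

-- The neighbour scans agree: A pushes (n, d+1) onto the array, B conses n onto its accumulator.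
theorem neighs_rel (t d : Int) : ∀ (ns : List Int) (vis : Std.HashSet Int)
    (base : List (Int × Int)) (acc : List Int),
    neighsA t d ns vis (Array.mk (base ++ acc.reverse.map (fun n => (n, d + 1)))) =
      Option.map (fun p => (p.1, Array.mk (base ++ p.2.reverse.map (fun n => (n, d + 1)))))
        (neighsB t ns vis acc) := by
  intro ns
  induction ns with
  | nil => intro vis base acc; simp [neighsA, neighsB]
  | cons n ns ih =>
    intro vis base acc
    simp only [neighsA, neighsB]
    split_ifs with h1 h2
    · rfl
    · have : (Array.mk (base ++ acc.reverse.map (fun n => (n, d + 1)))).push (n, d + 1) =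
          Array.mk (base ++ (n :: acc).reverse.map (fun n => (n, d + 1))) := by
        simp
      rw [this, ih]
    · exact ih vis base acc

-- The lockstep invariant: A's live queue (the array from index base.length on) is the rest of
-- B's current frontier at depth d followed by B's accumulated next frontier at depth d+1.
theorem lockstep (t : Int) (fuel : Nat) (cur acc : List Int) (d : Int)
    (vis : Std.HashSet Int) (base : List (Int × Int)) :
    loopA t fuel base.length
        (Array.mk (base ++ cur.map (fun v => (v, d))
          ++ acc.reverse.map (fun v => (v, d + 1)))) vis =
      (match levelB t d fuel cur vis acc with
       | .error r => r
       | .ok (f', vis', nf) => outerB t f' nf (d + 1) vis') := by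
  cases cur with
  | nil =>
    cases hacc : acc with
    | nil =>
      rw [loopA]
      simp [levelB, outerB]
    | cons a as =>
      have ih := lockstep t fuel ((a :: as).reverse) [] (d + 1) vis base
      simp only [List.map_nil, List.append_nil, List.reverse_nil] at ih ⊢
      rw [ih]
      simp only [levelB]
      match hrev : (a :: as).reverse with
      | [] => exact absurd hrev (by simp)
      | n :: ns =>
        rw [outerB_cons]
  | cons v vs =>
    rw [loopA]
    simp only [List.map_cons]
    have hget : (Array.mk (base ++ ((v, d) :: vs.map (fun v => (v, d)))
        ++ acc.reverse.map (fun v => (v, d + 1))))[base.length]? = some (v, d) := by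
      simp
    rw [hget]
    match fuel with
    | 0 => simp [levelB]
    | fuel + 1 =>
      dsimp only
      have harr : Array.mk (base ++ ((v, d) :: vs.map (fun v => (v, d)))
            ++ acc.reverse.map (fun v => (v, d + 1)))
          = Array.mk ((base ++ (v, d) :: vs.map (fun v => (v, d)))
            ++ acc.reverse.map (fun n => (n, d + 1))) := by
        simp
      rw [harr, neighs_rel]
      cases hn : neighsB t [v + 1, v - 1, v * 2, v - 10] vis acc with
      | none =>
        simp only [Option.map_none]
        rw [show levelB t d (fuel + 1) (v :: vs) vis acc = .error (d + 1) by
          simp only [levelB]; rw [hn]]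
      | some p =>
        obtain ⟨pv, pn⟩ := p
        simp only [Option.map_some]
        have ih := lockstep t fuel vs pn d pv (base ++ [(v, d)])
        have hlen : (base ++ [(v, d)]).length = base.length + 1 := by simp
        rw [hlen] at ih
        have harr2 : Array.mk ((base ++ (v, d) :: vs.map (fun v => (v, d)))
              ++ pn.reverse.map (fun n => (n, d + 1)))
            = Array.mk ((base ++ [(v, d)]) ++ vs.map (fun v => (v, d))
              ++ pn.reverse.map (fun v => (v, d + 1))) := by
          simp
        rw [harr2, ih]
        rw [show levelB t d (fuel + 1) (v :: vs) vis acc = levelB t d fuel vs pv pn by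
          simp only [levelB]; rw [hn]]
termination_by (fuel, acc.length)
decreasing_by
  · exact Prod.Lex.right' _ (by omega) (by simp)
  · exact Prod.Lex.left _ _ (by omega)

-- ===== VERDICT (by name: the statement is the Claim_ definition above) =====
theorem bfs_spec : Claim_equal_bfs := by
  intro start target _ _
  unfold Spec_bfs bfs bfs_alt
  by_cases h : start = target
  · simp [h]
  · simp only [if_neg h]
    have := lockstep target 1000002 [start] [] 0
      ((∅ : Std.HashSet Int).insert (if start < 0 then 1000001 + start else start)) []
    simp only [List.length_nil, List.map_cons, List.map_nil, List.nil_append,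
      List.append_nil, List.reverse_nil] at this
    rw [this, outerB_cons]
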